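-- pv_equiv track=rewrite | github.com/minhalansari/Project9_python | proj06.py | validate_hashtag
-- ===== SOURCE A (Python) =====
-- import string, calendar, pylab
--
-- def validate_hashtag(s):
--     '''takes a string and checks if it is a hashtag that
--     doesnt contain punctuation or numbers. returns true or false.'''
--     #for loop checking if there is punctuatioin in the string
--     for i in string.punctuation:
--         if i in s and i != '#':
--             return False
--     #for loop checking if there is a number in the string
--     for i in range(0,10):
--         if str(i) in s[1]:
--             return False
--     return True    #returns true if there is no number or punctuation
-- ===== SOURCE B (Python) =====
-- import string
--
-- def validate_hashtag(s):
--     '''takes a string and checks if it is a hashtag that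
--     doesnt contain punctuation or numbers. returns true or false.'''
--     bad = set(string.punctuation) - {'#'}
--     # single pass over s instead of scanning s once per punctuation char
--     for ch in s:
--         if ch in bad:
--             return False
--     # digit check on the second character only (as specified), after the pass
--     if s[1] in '0123456789':
--         return False
--     return True
-- ===== Notes on version B (the rewrite author's own statement) =====
-- stated objective: idiomatic
-- what changed: B builds the forbidden-punctuation set once and makes a single pass over s, instead of A's scan of s repeated for each of the 32 punctuation characters; the digit test on s[1] stays after the pass.
import Mathlib
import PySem

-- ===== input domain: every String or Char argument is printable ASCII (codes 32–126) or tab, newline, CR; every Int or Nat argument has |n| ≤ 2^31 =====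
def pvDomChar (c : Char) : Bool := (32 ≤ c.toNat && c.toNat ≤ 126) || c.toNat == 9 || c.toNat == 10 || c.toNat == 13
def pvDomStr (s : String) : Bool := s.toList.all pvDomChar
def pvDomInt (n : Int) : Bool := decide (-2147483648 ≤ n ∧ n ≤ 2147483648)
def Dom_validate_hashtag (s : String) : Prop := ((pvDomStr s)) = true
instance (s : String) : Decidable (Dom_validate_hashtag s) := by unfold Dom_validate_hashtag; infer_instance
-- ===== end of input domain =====

-- B walks the string once against a punctuation set built once; A scans the whole
-- string once per punctuation character. Same return value wherever A returns.

-- ===== PORT A =====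
-- string.punctuation
def punctChars : List Char := "!\"#$%&'()*+,-./:;<=>?@[\\]^_`{|}~".toList

-- 'for i in string.punctuation: if i in s and i != '#': return False'
-- ('i in s' for the 1-char string i is char membership in s)
def aPunctLoop (sl : List Char) : List Char → Option Bool
  | [] => none
  | i :: rest => if sl.contains i && i != '#' then some false else aPunctLoop sl rest

-- 'for i in range(0,10): if str(i) in s1: return False'  (s1 = s[1], a 1-char
-- string, so 'str(i) in s1' is equality with the digit character)
def aDigitLoop (c : Char) : List Char → Option Bool
  | [] => none
  | d :: rest => if d == c then some false else aDigitLoop c rest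

def validate_hashtag (s : String) : Bool :=
  match aPunctLoop s.toList punctChars with
  | some b => b
  | none =>
    match PySem.List.pyGet? s.toList 1 with   -- s[1]; none = IndexError, excluded by Pre_
    | none => false
    | some c =>
      match aDigitLoop c "0123456789".toList with
      | some b => b
      | none => true

-- ===== PORT B =====
-- bad = set(string.punctuation) - {'#'}
def badChars : List Char :=
  PySem.Set.diff (PySem.Set.ofList "!\"#$%&'()*+,-./:;<=>?@[\\]^_`{|}~".toList) ['#']

-- 'for ch in s: if ch in bad: return False'
def bScan (bad : List Char) : List Char → Option Bool
  | [] => none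
  | c :: rest => if PySem.Set.contains bad c then some false else bScan bad rest

def validate_hashtag_alt (s : String) : Bool :=
  match bScan badChars s.toList with
  | some b => b
  | none =>
    match PySem.List.pyGet? s.toList 1 with   -- s[1]; none = IndexError, excluded by Pre_
    | none => false
    | some c =>
      -- 's[1] in "0123456789"' for the 1-char string s[1] is char membership
      if ("0123456789".toList).contains c then false else true

-- ===== PRECONDITION & SPEC =====
-- Pre_ excludes exactly the inputs where A raises IndexError on s[1]: strings of
-- length < 2 that contain no forbidden punctuation character (B raises there too).
def Pre_validate_hashtag (s : String) : Prop :=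
  2 ≤ s.toList.length ∨
    ∃ c ∈ s.toList, c ∈ "!\"#$%&'()*+,-./:;<=>?@[\\]^_`{|}~".toList ∧ c ≠ '#'
instance (s : String) : Decidable (Pre_validate_hashtag s) := by
  unfold Pre_validate_hashtag; infer_instance
def pvWitness_validate_hashtag : String := "#abc"

def Spec_validate_hashtag (s : String) (out : Bool) : Prop := out = validate_hashtag_alt s
instance (s : String) (out : Bool) : Decidable (Spec_validate_hashtag s out) := by
  unfold Spec_validate_hashtag; infer_instance

-- ===== CLAIM (what is proved, stated in full; the proofs are below) =====
def Claim_equal_validate_hashtag : Prop :=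
  ∀ (s : String), Dom_validate_hashtag s → Pre_validate_hashtag s →
    Spec_validate_hashtag s (validate_hashtag s)

-- ===== LEMMAS AND PROOFS =====

-- A's punctuation loop, characterised
theorem aPunctLoop_eq (sl : List Char) (P : List Char) :
    aPunctLoop sl P =
      if P.any (fun i => sl.contains i && i != '#') then some false else none := by
  induction P with
  | nil => rfl
  | cons i rest ih =>
    cases h : (sl.contains i && i != '#') with
    | true => simp only [aPunctLoop, List.any_cons, h, Bool.true_or, if_true]
    | false => simp only [aPunctLoop, List.any_cons, h, Bool.false_or, Bool.false_eq_true,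
        if_false, ih]

-- B's scan, characterised
theorem bScan_eq (bad : List Char) (l : List Char) :
    bScan bad l =
      if l.any (fun c => PySem.Set.contains bad c) then some false else none := by
  induction l with
  | nil => rfl
  | cons c rest ih =>
    cases h : PySem.Set.contains bad c with
    | true => simp only [bScan, List.any_cons, h, Bool.true_or, if_true]
    | false => simp only [bScan, List.any_cons, h, Bool.false_or, Bool.false_eq_true,
        if_false, ih]

-- A's digit loop, characterised
theorem aDigitLoop_eq (c : Char) (ds : List Char) :
    aDigitLoop c ds = if ds.contains c then some false else none := by
  induction ds with
  | nil => rfl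
  | cons d rest ih =>
    cases h : (c == d) with
    | true => simp only [aDigitLoop, List.contains_cons, Bool.beq_comm, h, Bool.true_or, if_true]
    | false => simp only [aDigitLoop, List.contains_cons, Bool.beq_comm, h, Bool.false_or,
        Bool.false_eq_true, if_false, ih]

-- the two scans stop on the same strings
theorem any_eq (sl : List Char) :
    (punctChars.any (fun i => sl.contains i && i != '#')) =
      (sl.any (fun c => PySem.Set.contains badChars c)) := by
  apply Bool.coe_iff_coe.mp
  simp only [List.any_eq_true, Bool.and_eq_true, List.contains_iff_mem,
    PySem.Set.contains_iff, badChars, PySem.Set.mem_diff, PySem.Set.mem_ofList,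
    bne_iff_ne, ne_eq, punctChars]
  constructor
  · rintro ⟨i, hiP, hisl, hne⟩
    exact ⟨i, hisl, hiP, by simp [hne]⟩
  · rintro ⟨c, hcl, hcP, hc⟩
    exact ⟨c, hcP, hcl, by simpa using hc⟩

-- ===== VERDICT (by name: the statement is the Claim_ definition above) =====
theorem validate_hashtag_spec : Claim_equal_validate_hashtag := by
  intro s _ _
  unfold Spec_validate_hashtag validate_hashtag validate_hashtag_alt
  rw [aPunctLoop_eq, bScan_eq, any_eq]
  cases hany : s.toList.any (fun c => PySem.Set.contains badChars c) with
  | true => simp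
  | false =>
    cases hg : PySem.List.pyGet? s.toList 1 with
    | none => simp
    | some c =>
      simp only [Bool.false_eq_true, if_false]
      rw [aDigitLoop_eq]
      by_cases h : c = '0' ∨ c = '1' ∨ c = '2' ∨ c = '3' ∨ c = '4' ∨ c = '5' ∨ c = '6' ∨
          c = '7' ∨ c = '8' ∨ c = '9'
      · rw [if_pos (by simpa using h)]
        rcases h with h | h | h | h | h | h | h | h | h | h <;> simp [h]
      · rw [if_neg (by simpa using h)]
        simp only [not_or] at h
        obtain ⟨h0, h1, h2, h3, h4, h5, h6, h7, h8, h9⟩ := h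
        simp [h0, h1, h2, h3, h4, h5, h6, h7, h8, h9]
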